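-- pv_equiv track=rewrite | github.com/rajulubheem/thrivix | backend/app/services/enhanced_context_manager.py | _has_key_findings
-- ===== SOURCE A (Python) =====
-- from typing import Dict, List, Any, Optional, Set, Tuple
--
-- def _has_key_findings(result: Any) -> bool:
--     """Check if a result contains key findings"""
--     if not result:
--         return False
--
--     result_str = str(result).lower()
--     key_indicators = [
--         'found', 'discovered', 'identified', 'determined',
--         'conclusion', 'result', 'output', 'success', 'failure',
--         'important', 'critical', 'key', 'main'
--     ]
--
--     return any(indicator in result_str for indicator in key_indicators)
-- ===== SOURCE B (Python) =====
-- def _has_key_findings(result) -> bool: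
--     """Check if a result contains key findings (single left-to-right scan)."""
--     if not result:
--         return False
--     s = str(result).lower()
--     indicators = (
--         'found', 'discovered', 'identified', 'determined',
--         'conclusion', 'result', 'output', 'success', 'failure',
--         'important', 'critical', 'key', 'main'
--     )
--     for i in range(len(s)):
--         if s.startswith(indicators, i):
--             return True
--     return False
-- ===== Notes on version B (the rewrite author's own statement) =====
-- stated objective: alternative
-- what changed: Instead of thirteen independent whole-string substring scans (one per indicator), B makes a single left-to-right pass over the lowered string and tests at each position whether any indicator starts there via str.startswith with a tuple.
import Mathlib
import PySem

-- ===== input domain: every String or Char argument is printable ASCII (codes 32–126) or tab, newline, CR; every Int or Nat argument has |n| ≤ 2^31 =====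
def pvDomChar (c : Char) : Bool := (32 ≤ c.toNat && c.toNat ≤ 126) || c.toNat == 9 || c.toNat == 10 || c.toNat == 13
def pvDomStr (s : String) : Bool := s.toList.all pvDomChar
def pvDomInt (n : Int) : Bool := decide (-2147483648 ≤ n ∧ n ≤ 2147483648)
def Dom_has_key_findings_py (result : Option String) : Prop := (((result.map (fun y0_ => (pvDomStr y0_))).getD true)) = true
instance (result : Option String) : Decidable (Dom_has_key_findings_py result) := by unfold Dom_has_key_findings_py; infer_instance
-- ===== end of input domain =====

-- B replaces thirteen independent substring scans with one left-to-right startswith scan; alternative, same cost.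


-- ===== PORT A =====
-- A's key_indicators list (strings, in source order)
def kiA : List String :=
  ["found", "discovered", "identified", "determined",
   "conclusion", "result", "output", "success", "failure",
   "important", "critical", "key", "main"]

def has_key_findings_py (result : Option String) : Bool :=
  match result with
  | none => false            -- `not result` for None
  | some s =>
    if s = "" then false     -- `not result` for a falsy (empty) string
    else
      let result_str := PySem.Str.lower s
      kiA.any (fun indicator => PySem.Str.isIn indicator result_str)

-- ===== PORT B =====
-- B's indicators tuple, as lists of chars (B works position-by-position on the chars)
def kiB : List (List Char) :=
  ["found".toList, "discovered".toList, "identified".toList, "determined".toList,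
   "conclusion".toList, "result".toList, "output".toList, "success".toList, "failure".toList,
   "important".toList, "critical".toList, "key".toList, "main".toList]

-- B's `for i in range(len(s)): if s.startswith(indicators, i)` loop: recursion over the
-- suffixes of s (s.startswith(w, i) is exactly `w` being a prefix of the i-th suffix).
def kbScan (cs : List Char) : Bool :=
  match cs with
  | [] => false
  | _ :: rest =>
    if kiB.any (fun w => PySem.Chars.startswith cs w) then true else kbScan rest

def has_key_findings_py_alt (result : Option String) : Bool :=
  match result with
  | none => false
  | some s =>
    if s = "" then false
    else kbScan (PySem.Str.lower s).toList

-- ===== PRECONDITION & SPEC =====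
def Spec_has_key_findings_py (result : Option String) (out : Bool) : Prop := out = has_key_findings_py_alt result
instance (result : Option String) (out : Bool) : Decidable (Spec_has_key_findings_py result out) := by unfold Spec_has_key_findings_py; infer_instance

-- ===== CLAIM (what is proved, stated in full; the proofs are below) =====
def Claim_equal_has_key_findings_py : Prop := ∀ (result : Option String), Dom_has_key_findings_py result → Spec_has_key_findings_py result (has_key_findings_py result)

-- ===== LEMMAS AND PROOFS =====

-- every indicator is a nonempty word
theorem kiB_ne_nil : ∀ w ∈ kiB, w ≠ [] := by decide

-- B's scan succeeds iff some indicator is a prefix of some suffix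
theorem kbScan_iff (cs : List Char) :
    kbScan cs = true ↔ ∃ w ∈ kiB, ∃ j, w <+: cs.drop j := by
  induction cs with
  | nil =>
    simp only [kbScan, List.drop_nil, List.prefix_nil]
    constructor
    · intro h; exact absurd h (by simp)
    · rintro ⟨w, hw, _, rfl⟩; exact absurd rfl (kiB_ne_nil _ hw)
  | cons c rest ih =>
    simp only [kbScan]
    split_ifs with h
    · simp only [true_iff]
      rcases List.any_eq_true.mp h with ⟨w, hw, hsw⟩
      exact ⟨w, hw, 0, by simpa using (PySem.Chars.startswith_iff _ _).mp hsw⟩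
    · rw [ih]
      constructor
      · rintro ⟨w, hw, j, hj⟩
        exact ⟨w, hw, j + 1, by simpa using hj⟩
      · rintro ⟨w, hw, j, hj⟩
        cases j with
        | zero =>
          exfalso
          exact h (List.any_eq_true.mpr ⟨w, hw,
            (PySem.Chars.startswith_iff _ _).mpr (by simpa using hj)⟩)
        | succ j => exact ⟨w, hw, j, by simpa using hj⟩

-- B's scan computes exactly "some indicator occurs as a substring"
theorem kbScan_eq (cs : List Char) :
    kbScan cs = kiB.any (fun w => PySem.Chars.isIn w cs) := by
  rw [Bool.eq_iff_iff, kbScan_iff, List.any_eq_true]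
  constructor
  · rintro ⟨w, hw, j, hj⟩
    exact ⟨w, hw, (PySem.Chars.exists_prefix_drop_iff_isIn _ _).mp ⟨j, hj⟩⟩
  · rintro ⟨w, hw, hin⟩
    rcases (PySem.Chars.exists_prefix_drop_iff_isIn _ _).mpr hin with ⟨j, hj⟩
    exact ⟨w, hw, j, hj⟩

theorem kiB_eq_map : kiB = kiA.map String.toList := by decide

-- ===== VERDICT (by name: the statement is the Claim_ definition above) =====
theorem has_key_findings_py_spec : Claim_equal_has_key_findings_py := by
  intro result _
  unfold Spec_has_key_findings_py has_key_findings_py has_key_findings_py_alt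
  cases result with
  | none => rfl
  | some s =>
    simp only []
    split_ifs with h
    · rfl
    · rw [kbScan_eq, kiB_eq_map, List.any_map]
      simp only [Function.comp_def]
      simp [PySem.Str.isIn]
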